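-- pv_equiv track=rewrite | github.com/AndrewSpano/neuron-interpolation-model-fusion | utils/plot_utils.py | get_name_to_style
-- ===== SOURCE A (Python) =====
-- import itertools
-- from collections import defaultdict
--
-- PREFIX_TO_COLOR = {
--     'hf': 'purple',
--     'kf': 'green',
--     'ot': 'red',
--     'alf': 'blue',
--     'git': 'orange',
--     'model': 'gray',
-- }
--
-- HATCH_PATTERNS = ['/', '\\', '|', '-', '+', 'x', 'o', 'O', '.', '*']
--
-- def get_prefix(name):
--     """Assumes prefix is before the first '-'."""
--     return name.split('-')[0]
--
-- def get_name_to_style(model_names):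
--     """Assign colors and hatches to model names based on their prefixes."""
--     # group model names by prefix
--     prefix_to_models = defaultdict(list)
--     for name in model_names:
--         prefix = get_prefix(name)
--         prefix_to_models[prefix].append(name)
--
--     # assign hatches within each prefix
--     NAME_TO_STYLE = {}
--     for prefix, names in prefix_to_models.items():
--         hatch_cycle = itertools.cycle(HATCH_PATTERNS)
--         for name in sorted(names):  # sort for consistency
--             NAME_TO_STYLE[name] = (PREFIX_TO_COLOR.get(prefix, 'black'), next(hatch_cycle))
--
--     return NAME_TO_STYLE
-- ===== SOURCE B (Python) =====
-- PREFIX_TO_COLOR = {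
--     'hf': 'purple',
--     'kf': 'green',
--     'ot': 'red',
--     'alf': 'blue',
--     'git': 'orange',
--     'model': 'gray',
-- }
--
-- HATCH_PATTERNS = ['/', '\\', '|', '-', '+', 'x', 'o', 'O', '.', '*']
--
-- def get_prefix(name):
--     """Assumes prefix is before the first '-'."""
--     return name.split('-')[0]
--
-- def get_name_to_style(model_names):
--     """Assign colors and hatches to model names based on their prefixes."""
--     # rank each prefix by first appearance
--     rank = {}
--     for name in model_names:
--         p = get_prefix(name)
--         if p not in rank:
--             rank[p] = len(rank)
--     # one global sort: prefixes in first-appearance order, names alphabetical within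
--     ordered = sorted(model_names, key=lambda n: (rank[get_prefix(n)], n))
--     # single pass with a per-prefix counter
--     counter = {}
--     style = {}
--     for name in ordered:
--         p = get_prefix(name)
--         i = counter.get(p, 0)
--         style[name] = (PREFIX_TO_COLOR.get(p, 'black'), HATCH_PATTERNS[i % len(HATCH_PATTERNS)])
--         counter[p] = i + 1
--     return style
-- ===== Notes on version B (the rewrite author's own statement) =====
-- stated objective: alternative
-- what changed: Replaces A's group-by-prefix-then-sort-each-group-with-itertools.cycle structure by one global sort keyed on (prefix first-appearance rank, name) followed by a single linear pass that assigns hatches from a per-prefix counter dict.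
import Mathlib
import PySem

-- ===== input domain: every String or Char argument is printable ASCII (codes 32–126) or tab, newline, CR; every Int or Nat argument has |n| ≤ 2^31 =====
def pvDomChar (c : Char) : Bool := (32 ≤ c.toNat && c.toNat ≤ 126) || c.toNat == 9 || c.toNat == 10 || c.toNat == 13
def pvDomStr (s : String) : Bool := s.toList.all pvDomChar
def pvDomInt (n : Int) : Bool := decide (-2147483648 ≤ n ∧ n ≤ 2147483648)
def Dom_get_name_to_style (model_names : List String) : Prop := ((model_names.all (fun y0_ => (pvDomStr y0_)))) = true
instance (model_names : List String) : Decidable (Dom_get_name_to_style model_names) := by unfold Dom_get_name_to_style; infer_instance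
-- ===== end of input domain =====

-- B replaces A's group-then-sort-each-group-with-itertools.cycle structure by one global sort
-- (prefix first-appearance rank, then name) followed by a single pass with a per-prefix counter;
-- objective: alternative decomposition of the same task.


-- shared module-level constants and helper (PREFIX_TO_COLOR, HATCH_PATTERNS, get_prefix)
def pvColor : PySem.Dict String String :=
  PySem.Dict.ofList [("hf","purple"),("kf","green"),("ot","red"),("alf","blue"),("git","orange"),("model","gray")]
def pvHatch : List String := ["/","\\","|","-","+","x","o","O",".","*"]
-- get_prefix: name.split('-')[0]; split('-') is never empty so the head always exists
def pvPrefix (name : String) : String := ((PySem.Str.split? name "-").getD []).headD ""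

-- ===== PORT A =====
def get_name_to_style (model_names : List String) : List (String × String × String) :=
  let prefix_to_models : PySem.Dict String (List String) :=
    model_names.foldl (fun d name => d.modify (pvPrefix name) [] (· ++ [name])) PySem.Dict.empty
  let style : PySem.Dict String (String × String) :=
    prefix_to_models.items.foldl
      (fun st pr =>
        ((PySem.List.sorted pr.2 (fun x => x) false).foldl
          (fun (s : PySem.Dict String (String × String) × Nat) name =>
            (s.1.insert name (pvColor.getD pr.1 "black", pvHatch.getD (s.2 % pvHatch.length) ""), s.2 + 1))
          (st, 0)).1)
      PySem.Dict.empty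
  style.items

-- ===== PORT B =====
def get_name_to_style_alt (model_names : List String) : List (String × String × String) :=
  let rank : PySem.Dict String Int :=
    model_names.foldl (fun d name =>
      let p := pvPrefix name
      if d.contains p then d else d.insert p (d.size : Int)) PySem.Dict.empty
  let ordered := PySem.List.sorted model_names
      (fun n => toLex (((rank.get? (pvPrefix n)).getD 0 : Int), n)) false
  let fin := ordered.foldl
      (fun (s : PySem.Dict String (String × String) × PySem.Dict String Int) name =>
        let p := pvPrefix name
        let i := s.2.getD p 0
        (s.1.insert name (pvColor.getD p "black", pvHatch.getD (PySem.Int.mod i (pvHatch.length : Int)).toNat ""),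
         s.2.insert p (i + 1)))
      (PySem.Dict.empty, PySem.Dict.empty)
  fin.1.items

-- ===== PRECONDITION & SPEC =====
def Spec_get_name_to_style (model_names : List String) (out : List (String × String × String)) : Prop := out = get_name_to_style_alt model_names
instance (model_names : List String) (out : List (String × String × String)) : Decidable (Spec_get_name_to_style model_names out) := by unfold Spec_get_name_to_style; infer_instance

-- ===== CLAIM (what is proved, stated in full; the proofs are below) =====
def Claim_equal_get_name_to_style : Prop := ∀ (model_names : List String), Dom_get_name_to_style model_names → Spec_get_name_to_style model_names (get_name_to_style model_names)

-- ===== LEMMAS AND PROOFS =====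

-- proof-side abbreviations
def pvGrp (l : List String) (p : String) : List String := l.filter (fun n => pvPrefix n == p)
def pvP (l : List String) : List String := PySem.List.dedup (l.map pvPrefix)
def pvSrt (xs : List String) : List String := PySem.List.sorted xs (fun x => x) false
def pvIns (d : PySem.Dict String (String × String)) (q : String × String × String) :
    PySem.Dict String (String × String) := d.insert q.1 q.2
def pvTag (l : List String) (p : String) (i0 : Nat) : List (String × String × String) :=
  (l.zipIdx i0).map (fun q => (q.1, pvColor.getD p "black", pvHatch.getD (q.2 % pvHatch.length) ""))
def pvSeq (l : List String) : List (String × String × String) :=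
  (pvP l).flatMap (fun p => pvTag (pvSrt (pvGrp l p)) p 0)
def pvRank (l : List String) : PySem.Dict String Int :=
  l.foldl (fun d name =>
    let p := pvPrefix name
    if d.contains p then d else d.insert p (d.size : Int)) PySem.Dict.empty
def pvKey (r : PySem.Dict String Int) (n : String) : Lex (Int × String) :=
  toLex (((r.get? (pvPrefix n)).getD 0 : Int), n)
def pvStepB (s : PySem.Dict String (String × String) × PySem.Dict String Int) (name : String) :
    PySem.Dict String (String × String) × PySem.Dict String Int :=
  let p := pvPrefix name
  let i := s.2.getD p 0
  (s.1.insert name (pvColor.getD p "black", pvHatch.getD (PySem.Int.mod i (pvHatch.length : Int)).toNat ""),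
   s.2.insert p (i + 1))

theorem pv_g_items (l : List String) :
    (l.foldl (fun d name => d.modify (pvPrefix name) [] (· ++ [name])) PySem.Dict.empty).items
      = (pvP l).map (fun p => (p, pvGrp l p)) := by
  have hkeys : (l.foldl (fun d name => d.modify (pvPrefix name) [] (· ++ [name])) PySem.Dict.empty).keys
      = pvP l := by
    rw [PySem.Dict.keys_foldl_modify_key l pvPrefix [] (fun _ x => (· ++ [x]))]
    simp [PySem.Set.update, ← PySem.Set.ofList_eq_foldl, pvP, PySem.List.dedup_eq_ofList]
  have hnd : (l.foldl (fun d name => d.modify (pvPrefix name) [] (· ++ [name])) PySem.Dict.empty).keys.Nodup := by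
    rw [hkeys]; exact PySem.List.nodup_dedup _
  rw [PySem.Dict.items_eq_map_keys _ hnd [], hkeys]
  apply List.map_congr_left
  intro p _
  have hmap : l.foldl (fun d name => d.modify (pvPrefix name) [] (· ++ [name])) PySem.Dict.empty
      = (l.map (fun n => (pvPrefix n, n))).foldl (fun d q => d.modify q.1 [] (· ++ [q.2])) PySem.Dict.empty := by
    rw [List.foldl_map]
  rw [hmap, PySem.Dict.getD_foldl_modify_append]
  simp [List.filter_map, pvGrp, Function.comp_def]

theorem pv_innerA (l : List String) (p : String)
    (st : PySem.Dict String (String × String)) (i0 : Nat) :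
    l.foldl (fun (s : PySem.Dict String (String × String) × Nat) name =>
        (s.1.insert name (pvColor.getD p "black", pvHatch.getD (s.2 % pvHatch.length) ""), s.2 + 1))
      (st, i0)
      = ((pvTag l p i0).foldl pvIns st, i0 + l.length) := by
  induction l generalizing st i0 with
  | nil => simp [pvTag]
  | cons n t ih =>
    simp only [List.foldl_cons, ih, pvTag, List.zipIdx_cons, List.map_cons, pvIns, List.length_cons]
    congr 1
    omega

theorem pv_A_eq (l : List String) :
    get_name_to_style l = ((pvSeq l).foldl pvIns PySem.Dict.empty).items := by
  simp only [get_name_to_style]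
  rw [pv_g_items, List.foldl_map, pvSeq, List.foldl_flatMap]
  apply congrArg PySem.Dict.items
  apply PySem.List.foldl_congr_mem
  intro st p _
  have := congrArg Prod.fst (pv_innerA (pvSrt (pvGrp l p)) p st 0)
  simpa [pvSrt] using this

theorem pv_rankAux (qs : List String) :
    (qs.foldl (fun d p => if d.contains p then d else d.insert p (d.size : Int)) PySem.Dict.empty).items
      = (PySem.List.dedup qs).zipIdx.map (fun q => (q.1, (q.2 : Int))) := by
  induction qs using List.reverseRecOn with
  | nil => rfl
  | append_singleton qs p ih =>
    rw [List.foldl_append, List.foldl_cons, List.foldl_nil]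
    have hded : PySem.List.dedup (qs ++ [p])
        = PySem.Set.add (PySem.List.dedup qs) p := by
      simp only [PySem.List.dedup_eq_ofList, PySem.Set.ofList_eq_foldl, List.foldl_append,
        List.foldl_cons, List.foldl_nil]
    set d := qs.foldl (fun d p => if d.contains p then d else d.insert p (d.size : Int)) PySem.Dict.empty with hd
    have hkeys : d.keys = PySem.List.dedup qs := by
      show d.items.map Prod.fst = _
      rw [ih, List.map_map]
      simp [Function.comp_def]
    have hcont : d.contains p = decide (p ∈ PySem.List.dedup qs) := by
      rw [PySem.Dict.contains_eq_decide_mem_keys, hkeys]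
    by_cases hp : p ∈ PySem.List.dedup qs
    · have hp' : p ∈ qs := by simpa [PySem.List.mem_dedup] using hp
      rw [hcont]
      simp only [hp, decide_true, if_true]
      rw [ih, hded]
      simp [PySem.Set.add, PySem.Set.contains, hp']
    · have hp' : p ∉ qs := by simpa [PySem.List.mem_dedup] using hp
      rw [hcont]
      simp only [hp, decide_false, Bool.false_eq_true, if_false]
      have hsize : d.size = (PySem.List.dedup qs).length := by
        show d.items.length = _
        rw [ih]; simp
      rw [PySem.Dict.items_insert_of_not_contains _ _ (by rw [hcont]; simp [hp']), ih, hded, hsize]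
      simp [PySem.Set.add, PySem.Set.contains, hp', List.zipIdx_append]

theorem pv_rank_items (l : List String) :
    (pvRank l).items = ((pvP l).zipIdx).map (fun q => (q.1, (q.2 : Int))) := by
  have : pvRank l = (l.map pvPrefix).foldl
      (fun d p => if d.contains p then d else d.insert p (d.size : Int)) PySem.Dict.empty := by
    rw [List.foldl_map]; rfl
  rw [this, pv_rankAux]; rfl

theorem pv_rank_get (l : List String) (p : String) (hp : p ∈ pvP l) :
    ((pvRank l).get? p).getD 0 = ((pvP l).idxOf p : Int) := by
  have hnd : (pvRank l).keys.Nodup := by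
    show ((pvRank l).items.map Prod.fst).Nodup
    rw [pv_rank_items, List.map_map]
    simp [Function.comp_def, pvP]
  have hlt : (pvP l).idxOf p < (pvP l).length := List.idxOf_lt_length_of_mem hp
  have hmem : (p, ((pvP l).idxOf p : Int)) ∈ (pvRank l).items := by
    rw [pv_rank_items]
    refine List.mem_map.2 ⟨(p, (pvP l).idxOf p), ?_, rfl⟩
    rw [List.mem_iff_getElem]
    refine ⟨(pvP l).idxOf p, by simpa using hlt, ?_⟩
    rw [List.getElem_zipIdx]
    simp [List.getElem_idxOf]
  rw [(PySem.Dict.get?_eq_some_iff_mem_items _ _ _ hnd).2 hmem]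
  rfl

theorem pv_count_flatMap (l : List String) (Q : List String) (hnd : Q.Nodup) (x : String) :
    (Q.flatMap (fun p => pvGrp l p)).count x
      = if pvPrefix x ∈ Q then l.count x else 0 := by
  induction Q with
  | nil => simp
  | cons q Q ih =>
    rw [List.nodup_cons] at hnd
    rw [List.flatMap_cons, List.count_append, ih hnd.2]
    by_cases hq : pvPrefix x = q
    · have h1 : (pvGrp l q).count x = l.count x :=
        List.count_filter (by simp [hq])
      have h2 : pvPrefix x ∉ Q := hq ▸ hnd.1
      rw [h1, if_neg h2, if_pos (by simp [hq])]
      simp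
    · have h1 : (pvGrp l q).count x = 0 := by
        rw [List.count_eq_zero]
        intro hx
        exact hq (by simpa using List.of_mem_filter hx)
      simp [h1, hq, List.mem_cons]

theorem pv_perm (l : List String) :
    l.Perm ((pvP l).flatMap (fun p => pvGrp l p)) := by
  rw [List.perm_iff_count]
  intro x
  have hnd : (pvP l).Nodup := by unfold pvP; exact PySem.List.nodup_dedup _
  rw [pv_count_flatMap l (pvP l) hnd x]
  by_cases hx : pvPrefix x ∈ pvP l
  · simp [hx]
  · have : x ∉ l := fun hxl => hx (by
      simp [pvP]
      exact ⟨x, hxl, rfl⟩)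
    simp [hx, List.count_eq_zero.2 this]

theorem pv_mem_srt_grp {l : List String} {p n : String} (hn : n ∈ pvSrt (pvGrp l p)) :
    pvPrefix n = p ∧ n ∈ l := by
  rw [pvSrt, PySem.List.mem_sorted] at hn
  exact ⟨by simpa using List.of_mem_filter hn, List.mem_of_mem_filter hn⟩

theorem pv_ordered (l : List String) :
    PySem.List.sorted l (pvKey (pvRank l)) false
      = (pvP l).flatMap (fun p => pvSrt (pvGrp l p)) := by
  have hndP : (pvP l).Nodup := by unfold pvP; exact PySem.List.nodup_dedup _
  have hinj : Function.Injective (pvKey (pvRank l)) := by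
    intro a b h
    have := congrArg (fun x => (ofLex x).2) h
    simpa [pvKey] using this
  apply PySem.List.eq_of_perm_of_pairwise_le_of_injective (pvKey (pvRank l)) hinj
  · refine (PySem.List.sorted_perm l (pvKey (pvRank l)) false).trans ?_
    refine (pv_perm l).trans ?_
    exact List.Perm.flatMap_left _ (fun p _ => (PySem.List.sorted_perm (pvGrp l p) (fun x => x) false).symm)
  · exact PySem.List.sorted_pairwise l (pvKey (pvRank l))
  · rw [List.flatMap_def, List.pairwise_flatten]
    constructor
    · intro l' hl'
      obtain ⟨p, hp, rfl⟩ := List.mem_map.1 hl'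
      refine (PySem.List.sorted_pairwise (pvGrp l p) (fun x => x)).imp_of_mem ?_
      intro a b ha hb hab
      have hpa := (pv_mem_srt_grp ha).1
      have hpb := (pv_mem_srt_grp hb).1
      rw [pvKey, pvKey, Prod.Lex.toLex_le_toLex]
      exact Or.inr ⟨by rw [hpa, hpb], hab⟩
    · rw [List.pairwise_map, List.pairwise_iff_getElem]
      intro i j hi hj hij x hx y hy
      have hpi : (pvP l)[i] ∈ pvP l := List.getElem_mem hi
      have hpj : (pvP l)[j] ∈ pvP l := List.getElem_mem hj
      have hpx := (pv_mem_srt_grp hx).1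
      have hpy := (pv_mem_srt_grp hy).1
      rw [pvKey, pvKey, Prod.Lex.toLex_le_toLex]
      refine Or.inl ?_
      show (((pvRank l).get? (pvPrefix x)).getD 0 : Int) < ((pvRank l).get? (pvPrefix y)).getD 0
      rw [hpx, hpy, pv_rank_get l _ hpi, pv_rank_get l _ hpj,
        hndP.idxOf_getElem i hi, hndP.idxOf_getElem j hj]
      exact_mod_cast hij

theorem pv_blockB (l : List String) (p : String) (h : ∀ n ∈ l, pvPrefix n = p)
    (st : PySem.Dict String (String × String)) (c : PySem.Dict String Int) (i0 : Nat)
    (hc : c.getD p 0 = (i0 : Int)) :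
    (l.foldl pvStepB (st, c)).1 = (pvTag l p i0).foldl pvIns st
      ∧ ∀ q, q ≠ p → (l.foldl pvStepB (st, c)).2.contains q = c.contains q := by
  induction l generalizing st c i0 with
  | nil => simp [pvTag]
  | cons n t ih =>
    have hn : pvPrefix n = p := h n (List.mem_cons_self ..)
    have hmod : (PySem.Int.mod (i0 : Int) ((pvHatch.length : Nat) : Int)).toNat = i0 % pvHatch.length := by
      rw [PySem.Int.mod_eq_emod_of_pos (by simp [pvHatch])]
      have : (pvHatch.length : Nat) = 10 := by simp [pvHatch]
      rw [this]; omega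
    have hstep : pvStepB (st, c) n =
        (st.insert n (pvColor.getD p "black", pvHatch.getD (i0 % pvHatch.length) ""),
         c.insert p ((i0 : Int) + 1)) := by
      simp only [pvStepB, hn, hc, hmod]
    have hc' : (c.insert p ((i0 : Int) + 1)).getD p 0 = ((i0 + 1 : Nat) : Int) := by
      rw [PySem.Dict.getD_insert_self]; push_cast; ring
    obtain ⟨ih1, ih2⟩ := ih (fun m hm => h m (List.mem_cons_of_mem _ hm)) (st.insert n (pvColor.getD p "black", pvHatch.getD (i0 % pvHatch.length) "")) (c.insert p ((i0 : Int) + 1)) (i0 + 1) hc'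
    refine ⟨?_, ?_⟩
    · rw [List.foldl_cons, hstep, ih1]
      simp [pvTag, List.zipIdx_cons, pvIns]
    · intro q hq
      rw [List.foldl_cons, hstep, ih2 q hq, PySem.Dict.contains_insert]
      simp [hq]

theorem pv_outerB (l : List String) (Q : List String) (hnd : Q.Nodup)
    (st : PySem.Dict String (String × String)) (c : PySem.Dict String Int)
    (hc : ∀ p ∈ Q, c.contains p = false) :
    ((Q.flatMap (fun p => pvSrt (pvGrp l p))).foldl pvStepB (st, c)).1
      = (Q.flatMap (fun p => pvTag (pvSrt (pvGrp l p)) p 0)).foldl pvIns st := by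
  induction Q generalizing st c with
  | nil => simp
  | cons p Q ih =>
    have hmem : ∀ n ∈ pvSrt (pvGrp l p), pvPrefix n = p := by
      intro n hn
      rw [pvSrt, PySem.List.mem_sorted] at hn
      have := List.of_mem_filter hn
      simpa using this
    have hc0 : c.getD p 0 = ((0 : Nat) : Int) := by
      rw [PySem.Dict.getD_of_not_contains c 0 (hc p (List.mem_cons_self ..))]; rfl
    obtain ⟨h1, h2⟩ := pv_blockB (pvSrt (pvGrp l p)) p hmem st c 0 hc0
    have hnd' := hnd
    rw [List.nodup_cons] at hnd'
    simp only [List.flatMap_cons, List.foldl_append]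
    rw [ih hnd'.2 _ (((pvSrt (pvGrp l p)).foldl pvStepB (st, c)).2) ?_]
    · rw [h1]
    · intro q hq
      rw [h2 q (by rintro rfl; exact hnd'.1 hq)]
      exact hc q (List.mem_cons_of_mem _ hq)

theorem pv_B_eq (l : List String) :
    get_name_to_style_alt l = ((pvSeq l).foldl pvIns PySem.Dict.empty).items := by
  show ((PySem.List.sorted l (pvKey (pvRank l)) false).foldl pvStepB
      (PySem.Dict.empty, PySem.Dict.empty)).1.items = _
  rw [pv_ordered, pv_outerB l (pvP l) (by unfold pvP; exact PySem.List.nodup_dedup _)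
    PySem.Dict.empty PySem.Dict.empty (fun p _ => PySem.Dict.contains_empty p)]
  rfl

-- ===== VERDICT (by name: the statement is the Claim_ definition above) =====
theorem get_name_to_style_spec : Claim_equal_get_name_to_style := by
  intro l _
  unfold Spec_get_name_to_style
  rw [pv_A_eq, pv_B_eq]
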